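-- pv_equiv track=rewrite | github.com/DMGiulioRomano/PGE-ls | granular_ls/yaml_analyzer.py | get_word_at_cursor
-- ===== SOURCE A (Python) =====
-- def get_word_at_cursor(text: str, line: int, character: int) -> str:
--     """
--     Ritorna la parola completa sotto il cursore, indipendentemente
--     da dove si trova il cursore all'interno della parola.
--
--     Usato dal HoverProvider: se il cursore e' a meta' di 'density',
--     ritorna 'density' completo, non solo il prefisso 'den'.
--
--     Ritorna stringa vuota se il cursore non e' su un identificatore.
--     """
--     try:
--         lines = text.split('\n') if text else ['']
--         if line < 0 or line >= len(lines):
--             return ''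
--         current_line = lines[line]
--         character = min(character, len(current_line))
--
--         # Trova l'inizio della parola (vai a sinistra)
--         start = character
--         while start > 0 and (current_line[start-1].isalnum()
--                               or current_line[start-1] == '_'):
--             start -= 1
--
--         # Trova la fine della parola (vai a destra)
--         end = character
--         while end < len(current_line) and (current_line[end].isalnum()
--                                             or current_line[end] == '_'):
--             end += 1
--
--         return current_line[start:end]
--     except Exception:
--         return ''
-- ===== SOURCE B (Python) =====
-- def get_word_at_cursor(text: str, line: int, character: int) -> str:
--     """Segment the line once into maximal runs of word/non-word characters and
--     return the word-run whose interval contains the cursor (inclusive end)."""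
--     lines = text.split('\n') if text else ['']
--     if line < 0 or line >= len(lines):
--         return ''
--     current_line = lines[line]
--     character = min(character, len(current_line))
--     n = len(current_line)
--     pos = 0
--     while pos < n:
--         is_word = current_line[pos].isalnum() or current_line[pos] == '_'
--         end = pos + 1
--         while end < n and (current_line[end].isalnum()
--                            or current_line[end] == '_') == is_word:
--             end += 1
--         if is_word and pos <= character <= end:
--             return current_line[pos:end]
--         pos = end
--     return ''
-- ===== Notes on version B (the rewrite author's own statement) =====
-- stated objective: alternative
-- what changed: Replaces A's two character-by-character scans (left then right from the cursor) with a single left-to-right segmentation of the line into maximal word/non-word runs, returning the word run whose inclusive-end interval contains the (clamped) cursor.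
-- outside the precondition, e.g. on get_word_at_cursor('abc', 0, -2): A returns 'bc', B returns ''
import Mathlib
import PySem

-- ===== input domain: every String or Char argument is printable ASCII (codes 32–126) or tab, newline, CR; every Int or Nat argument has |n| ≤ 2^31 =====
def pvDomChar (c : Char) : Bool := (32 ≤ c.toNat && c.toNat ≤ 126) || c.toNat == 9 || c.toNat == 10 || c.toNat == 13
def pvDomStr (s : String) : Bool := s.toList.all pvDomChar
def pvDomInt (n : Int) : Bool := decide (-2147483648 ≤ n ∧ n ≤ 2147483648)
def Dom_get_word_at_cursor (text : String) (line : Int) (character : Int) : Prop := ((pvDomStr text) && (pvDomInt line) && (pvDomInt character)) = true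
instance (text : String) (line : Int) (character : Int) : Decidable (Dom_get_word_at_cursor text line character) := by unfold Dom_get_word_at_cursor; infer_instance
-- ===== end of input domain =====

-- B replaces A's two character scans outward from the cursor by one left-to-right segmentation
-- of the line into maximal word/non-word runs, returning the word run containing the cursor.


-- ===== PORT A =====
-- c.isalnum() or c == '_' (exact on the ASCII domain)
def pvWord (ch : Char) : Bool := ch.isAlphanum || ch == '_'

-- while start > 0 and (current_line[start-1].isalnum() or current_line[start-1] == '_'): start -= 1
def pvALeft (cs : List Char) (s : Int) : Int :=
  if 0 < s then
    match PySem.List.pyGet? cs (s - 1) with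
    | some ch => if pvWord ch then pvALeft cs (s - 1) else s
    | none => s          -- unreachable for s ≤ len(cs): index s-1 is then in range
  else s
termination_by s.toNat
decreasing_by omega

-- while end < len(current_line) and (current_line[end].isalnum() or current_line[end] == '_'): end += 1
-- none = the IndexError Python's wraparound indexing can raise for end < -len (caught: A returns '')
def pvARight (cs : List Char) (e : Int) : Option Int :=
  if e < (cs.length : Int) then
    match PySem.List.pyGet? cs e with
    | none => none
    | some ch => if pvWord ch then pvARight cs (e + 1) else some e
  else some e
termination_by ((cs.length : Int) - e).toNat
decreasing_by omega

def get_word_at_cursor (text : String) (line : Int) (character : Int) : String :=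
  let lines := if text = "" then [""] else (PySem.Str.split? text "\n").getD [""]
  if line < 0 ∨ PySem.List.len lines ≤ line then ""
  else
    let current := PySem.List.pyGetD lines line ""
    let c := min character (PySem.Str.len current)
    match pvARight current.toList c with
    | none => ""                      -- except Exception: return ''
    | some e =>
      String.ofList (PySem.List.slice current.toList (some (pvALeft current.toList c)) (some e))

-- ===== PORT B =====
-- the run loop of Source B: take the maximal same-key run starting at pos, return it if it is a
-- word run whose (inclusive-end) interval contains the cursor, else continue after it
def pvBLoop (cs : List Char) (pos c : Int) : String :=
  match cs with
  | [] => ""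
  | ch :: rest =>
    if pvWord ch ∧ pos ≤ c ∧ c ≤ pos + 1 + ((rest.takeWhile (fun x => pvWord x == pvWord ch)).length : Int)
    then String.ofList (ch :: rest.takeWhile (fun x => pvWord x == pvWord ch))
    else pvBLoop (rest.dropWhile (fun x => pvWord x == pvWord ch))
           (pos + 1 + ((rest.takeWhile (fun x => pvWord x == pvWord ch)).length : Int)) c
termination_by cs.length
decreasing_by
  simp only [List.length_cons]
  exact Nat.lt_succ_of_le (List.length_dropWhile_le _ rest)

def get_word_at_cursor_alt (text : String) (line : Int) (character : Int) : String :=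
  let lines := if text = "" then [""] else (PySem.Str.split? text "\n").getD [""]
  if line < 0 ∨ PySem.List.len lines ≤ line then ""
  else
    let current := PySem.List.pyGetD lines line ""
    let c := min character (PySem.Str.len current)
    pvBLoop current.toList 0 c

-- ===== PRECONDITION & SPEC =====
-- Pre_ excludes negative cursor columns — outside the natural editor/LSP domain — on which A's
-- rightward scan reads characters through Python's negative-index wraparound; B returns '' there.
def Pre_get_word_at_cursor (text : String) (line : Int) (character : Int) : Prop := 0 ≤ character
instance (text : String) (line : Int) (character : Int) : Decidable (Pre_get_word_at_cursor text line character) := by unfold Pre_get_word_at_cursor; infer_instance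

def pvWitness_get_word_at_cursor : String × Int × Int := ("abc def", 0, 5)

def Spec_get_word_at_cursor (text : String) (line : Int) (character : Int) (out : String) : Prop := out = get_word_at_cursor_alt text line character
instance (text : String) (line : Int) (character : Int) (out : String) : Decidable (Spec_get_word_at_cursor text line character out) := by unfold Spec_get_word_at_cursor; infer_instance

-- ===== CLAIM (what is proved, stated in full; the proofs are below) =====
def Claim_equal_get_word_at_cursor : Prop := ∀ (text : String) (line : Int) (character : Int), Dom_get_word_at_cursor text line character → Pre_get_word_at_cursor text line character → Spec_get_word_at_cursor text line character (get_word_at_cursor text line character)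

-- ===== LEMMAS AND PROOFS =====

-- the element a dropWhile stops at does not satisfy the predicate
theorem head_dropWhile_false {α : Type} (p : α → Bool) (l : List α) (y : α) (ys : List α)
    (h : l.dropWhile p = y :: ys) : p y = false := by
  induction l with
  | nil => simp at h
  | cons a l ih =>
    rw [List.dropWhile_cons] at h
    by_cases hpa : p a = true
    · rw [if_pos hpa] at h; exact ih h
    · rw [if_neg hpa] at h
      obtain ⟨rfl, -⟩ := List.cons.inj h
      cases hpy : p a
      · rfl
      · exact absurd hpy hpa

theorem takeWhile_append_of_nil {α : Type} (p : α → Bool) (l₁ l₂ : List α)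
    (h : l₂.takeWhile p = []) : (l₁ ++ l₂).takeWhile p = l₁.takeWhile p := by
  rw [List.takeWhile_append]
  split_ifs with hlen
  · rw [h, List.append_nil]
    exact ((List.takeWhile_prefix p).eq_of_length hlen).symm
  · rfl

-- A's rightward scan from a nonnegative in-range position computes
-- position + length of the word-prefix of the rest of the line
theorem pvARight_eq (cs : List Char) (d : Nat) (hd : d ≤ cs.length) :
    pvARight cs (d : Int)
      = some ((d : Int) + (((cs.drop d).takeWhile pvWord).length : Int)) := by
  unfold pvARight
  by_cases hdl : d < cs.length
  · have hlt : (d : Int) < (cs.length : Int) := by exact_mod_cast hdl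
    rw [if_pos hlt]
    have hget : PySem.List.pyGet? cs (d : Int) = some cs[d] := by
      rw [PySem.List.pyGet?_natCast]
      exact List.getElem?_eq_getElem hdl
    rw [hget]
    have hdrop : cs.drop d = cs[d] :: cs.drop (d + 1) := List.drop_eq_getElem_cons hdl
    cases hw : pvWord cs[d] with
    | true =>
      have hcast : (d : Int) + 1 = ((d + 1 : Nat) : Int) := by push_cast; ring
      have hrec := pvARight_eq cs (d + 1) hdl
      simp only [hw, if_true, hcast, hrec, hdrop, List.takeWhile_cons, List.length_cons]
      congr 1
      push_cast
      ring
    | false =>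
      simp only [hw, Bool.false_eq_true, if_false, hdrop, List.takeWhile_cons]
      simp
  · rw [if_neg (by exact_mod_cast hdl : ¬ (d : Int) < (cs.length : Int))]
    have : d = cs.length := le_antisymm hd (not_lt.mp hdl)
    subst this
    simp
termination_by cs.length - d
decreasing_by omega

-- A's leftward scan computes position - length of the word-suffix of the line before the cursor
theorem pvALeft_eq (cs : List Char) : ∀ (d : Nat), d ≤ cs.length →
    pvALeft cs (d : Int)
      = (d : Int) - ((((cs.take d).reverse.takeWhile pvWord)).length : Int) := by
  intro d
  induction d with
  | zero => intro _; unfold pvALeft; simp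
  | succ n ih =>
    intro hd
    have hn : n < cs.length := Nat.lt_of_succ_le hd
    unfold pvALeft
    have hpos : (0 : Int) < ((n + 1 : Nat) : Int) := by positivity
    rw [if_pos hpos]
    have hidx : ((n + 1 : Nat) : Int) - 1 = (n : Int) := by push_cast; ring
    have hget : PySem.List.pyGet? cs (n : Int) = some cs[n] := by
      rw [PySem.List.pyGet?_natCast]
      exact List.getElem?_eq_getElem hn
    rw [hidx, hget]
    have htake : cs.take (n + 1) = cs.take n ++ [cs[n]] := by
      rw [List.take_succ, List.getElem?_eq_getElem hn]
      rfl
    cases hw : pvWord cs[n] with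
    | true =>
      have hrec := ih (le_of_lt hn)
      simp only [hw, if_true, hrec, htake, List.reverse_append, List.reverse_cons,
        List.reverse_nil, List.nil_append, List.cons_append, List.takeWhile_cons,
        List.length_cons]
      push_cast
      omega
    | false =>
      simp only [hw, Bool.false_eq_true, if_false, htake, List.reverse_append,
        List.reverse_cons, List.reverse_nil, List.nil_append, List.cons_append,
        List.takeWhile_cons]
      simp

-- shifting the origin of B's run loop
theorem pvBLoop_shift (cs : List Char) (a p c : Int) :
    pvBLoop cs (p + a) (c + a) = pvBLoop cs p c := by
  match cs with
  | [] => rw [pvBLoop, pvBLoop]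
  | ch :: rest =>
    rw [pvBLoop, pvBLoop]
    by_cases hcond : pvWord ch = true ∧ p ≤ c ∧
        c ≤ p + 1 + ((rest.takeWhile (fun x => pvWord x == pvWord ch)).length : Int)
    · rw [if_pos ⟨hcond.1, by omega, by omega⟩, if_pos hcond]
    · rw [if_neg (by rintro ⟨h1, h2, h3⟩; exact hcond ⟨h1, by omega, by omega⟩), if_neg hcond]
      have he : p + a + 1 + ((rest.takeWhile (fun x => pvWord x == pvWord ch)).length : Int)
          = (p + 1 + ((rest.takeWhile (fun x => pvWord x == pvWord ch)).length : Int)) + a := by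
        ring
      rw [he]
      exact pvBLoop_shift _ a _ c
termination_by cs.length
decreasing_by
  simp only [List.length_cons]
  exact Nat.lt_succ_of_le (List.length_dropWhile_le _ rest)

-- a cursor strictly left of the current position is never found
theorem pvBLoop_lt (cs : List Char) (p c : Int) (h : c < p) : pvBLoop cs p c = "" := by
  match cs with
  | [] => rw [pvBLoop]
  | ch :: rest =>
    rw [pvBLoop]
    rw [if_neg (by rintro ⟨-, h2, -⟩; omega)]
    refine pvBLoop_lt _ _ c ?_
    have h0 : (0 : Int) ≤ ((rest.takeWhile (fun x => pvWord x == pvWord ch)).length : Int) := by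
      positivity
    omega
termination_by cs.length
decreasing_by
  simp only [List.length_cons]
  exact Nat.lt_succ_of_le (List.length_dropWhile_le _ rest)

-- B's run loop computes the word-suffix before the cursor ++ the word-prefix after it
theorem pvBLoop_spec (cs : List Char) (d : Nat) (hd : d ≤ cs.length) :
    pvBLoop cs 0 (d : Int)
      = String.ofList (((cs.take d).reverse.takeWhile pvWord).reverse
                        ++ (cs.drop d).takeWhile pvWord) := by
  match cs with
  | [] =>
    have hd0 : d = 0 := Nat.le_zero.mp hd
    subst hd0
    rw [pvBLoop]
    simp
  | ch :: rest =>
    have hrest : rest.takeWhile (fun x => pvWord x == pvWord ch)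
        ++ rest.dropWhile (fun x => pvWord x == pvWord ch) = rest :=
      List.takeWhile_append_dropWhile
    set t := rest.takeWhile (fun x => pvWord x == pvWord ch) with ht
    set dr := rest.dropWhile (fun x => pvWord x == pvWord ch) with hdr
    have hrun : ch :: rest = (ch :: t) ++ dr := by rw [List.cons_append, hrest]
    have hall : ∀ x ∈ ch :: t, pvWord x = pvWord ch := by
      intro x hx
      rcases List.mem_cons.mp hx with rfl | hx
      · rfl
      · have hx' : x ∈ rest.takeWhile (fun z => pvWord z == pvWord ch) := by
          rw [← ht]; exact hx
        have h2 := List.mem_takeWhile_imp hx'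
        simp only [beq_iff_eq] at h2
        exact h2
    have hdr_head : ∀ y ys, dr = y :: ys → (pvWord y == pvWord ch) = false := by
      intro y ys h
      exact head_dropWhile_false (fun x => pvWord x == pvWord ch) rest y ys (hdr ▸ h)
    have hlen : (ch :: rest).length = (t.length + 1) + dr.length := by
      rw [hrun]
      simp [List.length_append]
      omega
    rw [pvBLoop]
    simp only [← ht, ← hdr]
    by_cases hcase : pvWord ch = true ∧ d ≤ t.length + 1
    · rw [if_pos ⟨hcase.1, by positivity, by push_cast; omega⟩]
      have hdle : d ≤ (ch :: t).length := by simpa using hcase.2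
      have htakeE : (ch :: rest).take d = (ch :: t).take d := by
        rw [hrun, List.take_append_of_le_length hdle]
      have hdropE : (ch :: rest).drop d = (ch :: t).drop d ++ dr := by
        rw [hrun, List.drop_append_of_le_length hdle]
      have hTall : (((ch :: t).take d).reverse).takeWhile pvWord = ((ch :: t).take d).reverse := by
        rw [List.takeWhile_eq_self_iff]
        intro x hx
        rw [hall x (List.mem_of_mem_take (List.mem_reverse.mp hx))]
        exact hcase.1
      have hdrnil : dr.takeWhile pvWord = [] := by
        cases hdr2 : dr with
        | nil => rfl
        | cons y ys =>
          have hy : pvWord y = false := by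
            have h1 := hdr_head y ys hdr2
            rw [hcase.1] at h1
            simpa using h1
          simp [List.takeWhile_cons, hy]
      have hDall : ((ch :: t).drop d).takeWhile pvWord = (ch :: t).drop d := by
        rw [List.takeWhile_eq_self_iff]
        intro x hx
        rw [hall x (List.mem_of_mem_drop hx)]
        exact hcase.1
      rw [htakeE, hdropE, hTall, List.reverse_reverse,
        takeWhile_append_of_nil _ _ _ hdrnil, hDall, List.take_append_drop]
    · rw [if_neg (by rintro ⟨h1, -, h3⟩; exact hcase ⟨h1, by push_cast at h3; omega⟩)]
      by_cases hge : t.length + 1 ≤ d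
      · -- cursor at or past the end of the first run: recurse on the rest
        have hd2 : d - (t.length + 1) ≤ dr.length := by
          rw [hlen] at hd; omega
        have hcast : (d : Int) = ((d - (t.length + 1) : Nat) : Int)
            + ((t.length + 1 : Nat) : Int) := by push_cast; omega
        have hshift : (0 : Int) + 1 + (t.length : Int) = 0 + ((t.length + 1 : Nat) : Int) := by
          push_cast; ring
        rw [hshift, hcast, pvBLoop_shift dr ((t.length + 1 : Nat) : Int) 0 _]
        rw [pvBLoop_spec dr (d - (t.length + 1)) hd2]
        have hr1 : (ch :: t).length = t.length + 1 := by simp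
        have hdropEq : (ch :: rest).drop d = dr.drop (d - (t.length + 1)) := by
          rw [hrun, List.drop_append, List.drop_eq_nil_of_le (by rw [hr1]; omega), hr1]
          simp
        have htakeEq : (ch :: rest).take d = (ch :: t) ++ dr.take (d - (t.length + 1)) := by
          rw [hrun, List.take_append, List.take_of_length_le (by rw [hr1]; omega), hr1]
        rw [hdropEq, htakeEq, List.reverse_append]
        have hT : ((dr.take (d - (t.length + 1))).reverse ++ (ch :: t).reverse).takeWhile pvWord
            = ((dr.take (d - (t.length + 1))).reverse).takeWhile pvWord := by
          by_cases hk : pvWord ch = true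
          · have hdgt : t.length + 1 < d := by
              rcases Nat.lt_or_ge (t.length + 1) d with h | h
              · exact h
              · exact absurd ⟨hk, by omega⟩ hcase
            obtain ⟨y, ys, hdr2⟩ : ∃ y ys, dr = y :: ys := by
              cases hdr3 : dr with
              | nil => rw [hdr3] at hd2; simp at hd2; omega
              | cons y ys => exact ⟨y, ys, rfl⟩
            have hy : pvWord y = false := by
              have h1 := hdr_head y ys hdr2
              rw [hk] at h1
              simpa using h1
            have hymem : y ∈ (dr.take (d - (t.length + 1))).reverse := by
              rw [List.mem_reverse, hdr2]
              obtain ⟨m, hm⟩ : ∃ m, d - (t.length + 1) = m + 1 :=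
                ⟨d - (t.length + 1) - 1, by omega⟩
              rw [hm]
              simp [List.take_cons]
            rw [List.takeWhile_append]
            rw [if_neg ?_]
            intro hlen2
            have hXeq := (List.takeWhile_prefix (l := (dr.take (d - (t.length + 1))).reverse)
              pvWord).eq_of_length hlen2
            have hyw := List.takeWhile_eq_self_iff.mp hXeq y hymem
            rw [hy] at hyw
            exact Bool.false_ne_true hyw
          · have hnil : ((ch :: t).reverse).takeWhile pvWord = [] := by
              rw [List.takeWhile_eq_nil_iff]
              intro hl
              have hmem : (ch :: t).reverse.get ⟨0, hl⟩ ∈ ch :: t := by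
                rw [← List.mem_reverse]
                exact List.get_mem _ _
              rw [hall _ hmem]
              simpa using hk
            exact takeWhile_append_of_nil _ _ _ hnil
        rw [hT]
      · -- cursor strictly inside the (necessarily non-word) first run: result ''
        have hk : pvWord ch = false := by
          cases hpk : pvWord ch
          · rfl
          · exact absurd ⟨hpk, by omega⟩ hcase
        rw [pvBLoop_lt _ _ _ (by push_cast; omega)]
        have hdlt : d < (ch :: t).length := by simp; omega
        have hR : ((ch :: rest).drop d).takeWhile pvWord = [] := by
          have hdlt2 : d < (ch :: rest).length := by rw [hlen]; omega
          rw [List.drop_eq_getElem_cons hdlt2, List.takeWhile_cons]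
          have hmem : (ch :: rest)[d] ∈ ch :: t := by
            have he := List.getElem_of_eq hrun hdlt2
            rw [he, List.getElem_append_left hdlt]
            exact List.getElem_mem _
          rw [hall _ hmem, hk]
          simp
        have htakeE2 : (ch :: rest).take d = (ch :: t).take d := by
          rw [hrun, List.take_append_of_le_length (le_of_lt hdlt)]
        have hT : (((ch :: rest).take d).reverse).takeWhile pvWord = [] := by
          rw [htakeE2, List.takeWhile_eq_nil_iff]
          intro hl
          have hmem : ((ch :: t).take d).reverse.get ⟨0, hl⟩ ∈ ch :: t := by
            have hg := List.get_mem ((ch :: t).take d).reverse ⟨0, hl⟩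
            exact List.mem_of_mem_take (List.mem_reverse.mp hg)
          rw [hall _ hmem, hk]
          simp
        rw [hR, hT]
        simp
termination_by cs.length
decreasing_by
  simp only [List.length_cons]
  exact Nat.lt_succ_of_le (List.length_dropWhile_le _ rest)

-- A's slice start:end is exactly that word-suffix ++ word-prefix
theorem slice_eq_spec (cs : List Char) (d : Nat) (hd : d ≤ cs.length) :
    PySem.List.slice cs
        (some ((d : Int) - ((((cs.take d).reverse.takeWhile pvWord)).length : Int)))
        (some ((d : Int) + (((cs.drop d).takeWhile pvWord).length : Int)))
      = ((cs.take d).reverse.takeWhile pvWord).reverse ++ (cs.drop d).takeWhile pvWord := by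
  set T := (cs.take d).reverse.takeWhile pvWord with hT
  set R := (cs.drop d).takeWhile pvWord with hR
  have htl : T.length ≤ d := by
    have h1 := (List.takeWhile_prefix (l := (cs.take d).reverse) pvWord).length_le
    simpa [List.length_take, Nat.min_eq_left hd] using h1
  have htr : R.length ≤ cs.length - d := by
    have h1 := (List.takeWhile_prefix (l := cs.drop d) pvWord).length_le
    simpa [List.length_drop] using h1
  rw [PySem.List.slice_toNat cs (by omega) (by positivity)]
  have h1 : ((d : Int) - (T.length : Int)).toNat = d - T.length := by omega
  have h2 : ((d : Int) + (R.length : Int)).toNat = d + R.length := by omega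
  rw [h1, h2]
  have h3 : d + R.length - (d - T.length) = T.length + R.length := by omega
  rw [h3]
  have hX : (cs.take d).drop (d - T.length) = T.reverse := by
    have hpre : (cs.take d).reverse.take T.length = T :=
      (List.prefix_iff_eq_take.mp (List.takeWhile_prefix pvWord)).symm
    have h4 := List.reverse_take (l := (cs.take d).reverse) (i := T.length)
    rw [hpre, List.reverse_reverse, List.length_reverse, List.length_take,
      Nat.min_eq_left hd] at h4
    exact h4.symm
  have hRt : (cs.drop d).take R.length = R :=
    (List.prefix_iff_eq_take.mp (List.takeWhile_prefix pvWord)).symm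
  conv_lhs => rw [← List.take_append_drop d cs]
  rw [List.drop_append_of_le_length (by rw [List.length_take, Nat.min_eq_left hd]; omega)]
  rw [hX, List.take_append, List.take_of_length_le (by simp)]
  have h5 : T.length + R.length - T.reverse.length = R.length := by simp
  rw [h5, hRt]

theorem core_eq (cs : List Char) (c : Int) (h0 : 0 ≤ c) (hle : c ≤ (cs.length : Int)) :
    (match pvARight cs c with
     | none => ""
     | some e => String.ofList (PySem.List.slice cs (some (pvALeft cs c)) (some e)))
      = pvBLoop cs 0 c := by
  obtain ⟨d, rfl⟩ : ∃ d : Nat, c = (d : Int) := ⟨c.toNat, (Int.toNat_of_nonneg h0).symm⟩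
  have hd : d ≤ cs.length := by exact_mod_cast hle
  rw [pvARight_eq cs d hd]
  simp only [pvALeft_eq cs d hd]
  rw [slice_eq_spec cs d hd, pvBLoop_spec cs d hd]

-- ===== VERDICT (by name: the statement is the Claim_ definition above) =====
theorem get_word_at_cursor_spec : Claim_equal_get_word_at_cursor := by
  intro text line character _ hpre
  unfold Spec_get_word_at_cursor
  simp only [get_word_at_cursor, get_word_at_cursor_alt]
  by_cases hline : line < 0 ∨ PySem.List.len
      (if text = "" then [""] else (PySem.Str.split? text "\n").getD [""]) ≤ line
  · rw [if_pos hline, if_pos hline]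
  · rw [if_neg hline, if_neg hline]
    set current := PySem.List.pyGetD
      (if text = "" then [""] else (PySem.Str.split? text "\n").getD [""]) line "" with hcur
    have hlen : PySem.Str.len current = (current.toList.length : Int) := PySem.Str.len_eq current
    have h0 : 0 ≤ min character (PySem.Str.len current) := by
      refine le_min hpre ?_
      rw [hlen]
      positivity
    have hle2 : min character (PySem.Str.len current) ≤ (current.toList.length : Int) := by
      rw [← hlen]
      exact min_le_right _ _
    exact core_eq current.toList _ h0 hle2
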